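/- PORTED by tools/port_fixed.py from Prog/Jsmn/S/StrQuote.lean to THE FIXED IMAGE fixed/jsmn_s.bin (same bytes at the same addresses; binFS). Do not edit: edit the original and port again. -/
/-
  jsmn_s.bin, `jsmn_parse_string`: the closing quote (100170H) — counting mode returns 0; otherwise `jsmn_alloc_token` (NULL → JSMN_ERROR_NOMEM,
  `pos = start`), `jsmn_fill_token(token, JSMN_STRING, start + 1, pos)` and the parent link (Prog/Jsmn/S/StrTok.lean). The two callees are used through
  their contracts.
    quote_count   100170H, tokens == NULL → 10029FH → 1001CAH                           (2 + 2 instructions)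
    quote_tok     100170H with a token array → call jsmn_alloc_token → alloc_null | alloc_some     (6 + the callee)
-/
import Prog.Jsmn.Fixed.Specs
import Prog.Jsmn.Fixed.CodeFS
import Prog.Jsmn.Fixed.S.StrTok
namespace X86
namespace J6
namespace FS
namespace Str
open X86.User (CodeAt RegsKept Span FlagsOK Layout toNat_add_ofNat toNat_ofNat_lt' add_ofNat_add)
open Jsmn JsmnFSBytes

set_option maxRecDepth 100000
set_option maxHeartbeats 4000000
set_option linter.unusedSimpArgs false
set_option linter.unusedVariables false

variable {c : SCtx} {n : User.Layout} {v0 v : User.State}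

/-- 100170H in counting mode (`tokens == NULL`): return 0, `pos` stays at the quote. -/
theorem quote_count (he : Entry c n v0) {q : Nat} (ha : At c n v0 v 0x100170 q) (hn : c.toks = none) :
    Reach n v (fun v' => AtRet c n v0 v' 0 { c.p with pos := q } none) := by
  obtain ⟨hp, hr8⟩ := he
  obtain ⟨hrip, hf⟩ := ha
  have hW := hp.toksW
  v3_open hp hf hW
  j6f_bin
  rw [hn] at hf_core_toksArg
  have htb : c.tb = 0 := hf_core_toksArg
  v3_walk hf_core_code hp.call.fetch [htb] until [0x1001ca]
  · refine Reach.done ⟨by simp, ⟨by (v3_regnorm; exact hf_core_rsp), by v3_kept, by v3_frame hf_core_sv12, by v3_frame hf_core_svbp, by v3_frame hf_core_svbx,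
        by v3_frame hf_core_retA, by (unfold dataWins SCtx.tlen at *; v3_same), by v3_frame hf_core_code, by v3_frame hf.core.parser, htb⟩, by v3_regnorm; rfl⟩

/-- The model's `allocToken`, when there is room. -/
theorem allocToken_some {p : Parser} {ts : Tokens} {nt : Nat} (h : ¬ p.toknext ≥ nt) :
    allocToken Config.strictLinks p ts nt = some (p.toknext, { p with toknext := u32 (p.toknext + 1) },
      ts.set p.toknext { ts.getD p.toknext default with start := -1, «end» := -1, size := 0, parent := -1 }) := by
  simp [allocToken, h, links_strictLinks]

/-- 100170H with a token array: `jsmn_alloc_token`; NULL → JSMN_ERROR_NOMEM with `pos = start`; otherwise `jsmn_fill_token`, the parent link, and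
return 0. -/
theorem quote_tok (halloc : AllocSpec binFS n) (hfill : FillSpec binFS n) (he : Entry c n v0) {q : Nat} {ts : Tokens} (ha : At c n v0 v 0x100170 q)
    (hs : c.toks = some ts) :
    Reach n v (fun v' =>
      match allocToken Config.strictLinks { c.p with pos := q } ts c.numTokens with
      | none => AtRet c n v0 v' JSMN_ERROR_NOMEM c.p (some ts)
      | some (i, p', ts') =>
        AtRet c n v0 v' 0 p'
          (some ((ts'.set i (fillToken (ts'.getD i default) JSMN_STRING (i32 (i32 c.p.pos + 1)) (i32 q))).set i
            { (ts'.set i (fillToken (ts'.getD i default) JSMN_STRING (i32 (i32 c.p.pos + 1)) (i32 q))).getD i default with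
              parent := p'.toksuper }))) := by
  have he' := he
  obtain ⟨hp, hr8⟩ := he
  obtain ⟨hrip, hf⟩ := ha
  have hp' := hp
  rw [hs] at hp'
  have hR := hp'.toksRegion
  v3_open hp hf hR
  j6f_bin
  strs_some_f
  have himg : CodeAt v.mem 0x100000 binFS.image := by v3_frame hp.call.img
  have hq32 : q < 2 ^ 32 := hf_core_parser_pos ▸ User.Mem.readLE4_lt _ _
  have hpos : c.p.pos < 2 ^ 32 := hp_parser_pos ▸ User.Mem.readLE4_lt _ _
  have htbn : c.tb.toNat ≠ 0 := fun h => htb0 (UInt64.toNat_inj.mp h)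
  v3_walk hf_core_code hp.call.fetch [] until [0x1001ca]
  -- right after `call jsmn_alloc_token`
  refine Reach.trans (halloc _ 0x100187 c.pa c.tb c.numTokens { c.p with pos := q } ts ?pre) ?_
  case pre =>
    refine ⟨by show CallPre n 0x100000 binFS.image 0x100040 0 0x100187 _; v3_callpre himg hp.call, by simp, by simp, by simp, hp_nlt,
      by v3_frame hf.core.parser, by show TokensAt Config.strictLinks _ _ _; v3_frame htoks, htslen,
      ⟨hp_env_parserR_lo, hp_env_parserR_hi, ?_, ?_⟩, ⟨hR_lo, ?_, ?_, ?_⟩, ?_⟩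
    all_goals j6f_bin
    all_goals first | v3_omega | (v3_regnorm; v3_omega)
  intro v1 hpost
  obtain ⟨hpost1, hres⟩ := hpost
  v3_open hpost1
  have hk := hpost1.kept
  v3_viewnorm [X86.J6.dataWins, X86.J6.binFS_cfg, X86.J6.tokSize_strictLinks, X86.J6.links_strictLinks] at hpost1_rsp hpost1_same hres
  have hcore1 : ∀ pp tk, ParserAt v1.mem c.pa pp → ToksArg Config.strictLinks v1.mem c.tb c.numTokens tk → Core c n v0 v1 pp tk := fun pp tk h1 h2 =>
    ⟨hpost1_rsp, RegsKept.trans (by v3_kept) (hk.mono (by v3_regs_sub)), by v3_frame hf_core_sv12, by v3_frame hf_core_svbp, by v3_frame hf_core_svbx,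
      by v3_frame hf_core_retA, by (unfold dataWins SCtx.tlen; simp only [hs, toksBytes, tokSize_strictLinks]; v3_same), by v3_frame hcodeW, h1, h2⟩
  have hrbx1 : v1.reg .rbx = c.pa := by rw [hk.get .rbx rfl]; v3_regnorm; exact hf_rbx
  have hrbp1 : v1.reg .rbp = UInt64.ofNat c.p.pos := by rw [hk.get .rbp rfl]; v3_regnorm; exact hf_rbp
  by_cases hge : c.p.toknext ≥ c.numTokens
  · -- no room: rax = NULL, memory as before the call
    have hnone : allocToken Config.strictLinks { c.p with pos := q } ts c.numTokens = none := by simp [allocToken, hge]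
    rw [hnone] at hres ⊢
    obtain ⟨hrax1, hmem1⟩ := hres
    try v3_viewnorm [X86.J6.dataWins, X86.J6.binFS_cfg, X86.J6.tokSize_strictLinks, X86.J6.links_strictLinks] at hmem1
    exact alloc_null he' hpost1_rip hs
      (hcore1 _ _ (by rw [hmem1]; v3_frame hf.core.parser) ⟨htb0, htslen, by rw [hmem1]; v3_frame htoks⟩) hrax1 hrbx1 hrbp1
  · -- tokens[toknext] allocated
    have hsome := allocToken_some (p := { c.p with pos := q }) (ts := ts) (nt := c.numTokens) hge
    rw [hsome] at hres ⊢
    obtain ⟨hrax1, hpa1, htoks1⟩ := hres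
    exact alloc_some hfill he' hpost1_rip hs (hcore1 _ _ hpa1 ⟨htb0, by rw [List.length_set]; exact htslen, htoks1⟩) rfl (by show c.p.toknext < _; omega)
      hrax1 hrbx1 hrbp1

end Str
end FS
end J6
end X86
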